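-- pv_equiv track=rewrite | github.com/nithin047/project_euler | python/4.py | check_prod_palindrome
-- ===== SOURCE A (Python) =====
-- def check_prod_palindrome(a, b):
--
-- 	prod = a*b
--
-- 	digits = []
--
-- 	while(prod!=0):
-- 		digits.append(prod%10)
-- 		prod = prod//10
--
-- 	rev_digits = digits.copy()
-- 	rev_digits.reverse()
--
-- 	return (digits == rev_digits)
-- ===== SOURCE B (Python) =====
-- def check_prod_palindrome(a, b):
--     s = str(a * b)
--     return s == s[::-1]
-- ===== Notes on version B (the rewrite author's own statement) =====
-- stated objective: simpler
-- what changed: B converts the product to its decimal string once and compares it with its slice-reversal, instead of A's arithmetic loop that extracts a digit list with % and //, copies it, reverses the copy and compares lists.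
import Mathlib
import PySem

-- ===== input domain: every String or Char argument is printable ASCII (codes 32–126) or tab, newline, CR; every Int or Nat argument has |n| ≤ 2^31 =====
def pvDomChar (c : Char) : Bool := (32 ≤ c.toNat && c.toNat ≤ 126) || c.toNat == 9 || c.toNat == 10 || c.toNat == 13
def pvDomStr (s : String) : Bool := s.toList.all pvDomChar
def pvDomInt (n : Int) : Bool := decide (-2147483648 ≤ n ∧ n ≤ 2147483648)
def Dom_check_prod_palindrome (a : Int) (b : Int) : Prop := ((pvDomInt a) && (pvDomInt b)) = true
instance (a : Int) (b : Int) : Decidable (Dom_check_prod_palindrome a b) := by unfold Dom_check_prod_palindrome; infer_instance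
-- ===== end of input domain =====

-- B compares the decimal string of the product with its slice-reversal instead of
-- A's arithmetic digit-list build/copy/reverse/compare (objective: simpler).

-- ===== PORT A =====
-- A's while loop collecting prod%10 into `digits`; the `prod ≤ 0` guard only makes the
-- recursion total (Python loops forever for prod < 0; those inputs are outside Pre_).
def pvDigitsLoop_A (prod : Int) : List Int :=
  if prod ≤ 0 then []
  else PySem.Int.mod prod 10 :: pvDigitsLoop_A (PySem.Int.floordiv prod 10)
termination_by prod.toNat
decreasing_by
  have := PySem.Int.floordiv_eq_ediv_of_pos (a := prod) (b := 10) (by omega)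
  rw [this]; omega

def check_prod_palindrome (a : Int) (b : Int) : Bool :=
  let digits := pvDigitsLoop_A (a * b)
  let rev_digits := digits.reverse
  digits == rev_digits

-- ===== PORT B =====
-- B: s = str(a*b); s == s[::-1].  The slice s[::-1] is PySem.Str.slice? with step -1
-- (always `some` for a nonzero step; the `none` branch is unreachable).
def check_prod_palindrome_alt (a : Int) (b : Int) : Bool :=
  let s := PySem.Int.toStr (a * b)
  match PySem.Str.slice? s none none (-1) with
  | some r => s == r
  | none => false

-- ===== PRECONDITION & SPEC =====
-- Pre_ excludes a*b < 0, on which Python A's while loop never terminates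
-- (prod//10 floors toward -1 and stays there).
def Pre_check_prod_palindrome (a : Int) (b : Int) : Prop := 0 ≤ a * b
instance (a : Int) (b : Int) : Decidable (Pre_check_prod_palindrome a b) := by
  unfold Pre_check_prod_palindrome; infer_instance

def pvWitness_check_prod_palindrome : Int × Int := (11, 11)

def Spec_check_prod_palindrome (a : Int) (b : Int) (out : Bool) : Prop := out = check_prod_palindrome_alt a b
instance (a : Int) (b : Int) (out : Bool) : Decidable (Spec_check_prod_palindrome a b out) := by unfold Spec_check_prod_palindrome; infer_instance

-- ===== CLAIM (what is proved, stated in full; the proofs are below) =====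
def Claim_equal_check_prod_palindrome : Prop := ∀ (a : Int) (b : Int), Dom_check_prod_palindrome a b → Pre_check_prod_palindrome a b → Spec_check_prod_palindrome a b (check_prod_palindrome a b)

-- ===== LEMMAS AND PROOFS =====

theorem pvDigitsLoop_A_pos (p : Int) (hp : ¬ p ≤ 0) :
    pvDigitsLoop_A p = PySem.Int.mod p 10 :: pvDigitsLoop_A (PySem.Int.floordiv p 10) := by
  rw [pvDigitsLoop_A]; simp [hp]

-- A's loop produces Mathlib's little-endian digits, cast to Int
theorem pvA_eq_digits (p : Int) (hp : 0 ≤ p) :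
    pvDigitsLoop_A p = (Nat.digits 10 p.toNat).map Int.ofNat := by
  induction p using pvDigitsLoop_A.induct with
  | case1 p h =>
    have : p = 0 := by omega
    subst this; rw [pvDigitsLoop_A]; simp
  | case2 p h ih =>
    have h10 : (0:Int) < 10 := by omega
    have hfd := PySem.Int.floordiv_eq_ediv_of_pos (a := p) (b := 10) h10
    have hmd := PySem.Int.mod_eq_emod_of_pos (a := p) (b := 10) h10
    have hnn : 0 ≤ PySem.Int.floordiv p 10 := by rw [hfd]; omega
    rw [pvDigitsLoop_A_pos p h, ih hnn, Nat.digits_def' (by omega) (n := p.toNat) (by omega)]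
    have e1 : PySem.Int.mod p 10 = Int.ofNat (p.toNat % 10) := by
      rw [hmd]; simp only [Int.ofNat_eq_natCast]; omega
    have e2 : (PySem.Int.floordiv p 10).toNat = p.toNat / 10 := by
      rw [hfd]; omega
    rw [e1, e2]; simp

-- Nat.toDigitsCore with enough fuel is the reversed digit characters
theorem pvToDigitsCore_eq (fuel : Nat) : ∀ (n : Nat) (ds : List Char), n ≠ 0 → n ≤ fuel →
    Nat.toDigitsCore 10 fuel n ds = ((Nat.digits 10 n).map Nat.digitChar).reverse ++ ds := by
  induction fuel with
  | zero => intro n ds h hle; omega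
  | succ fuel ih =>
    intro n ds h hle
    rw [Nat.toDigitsCore]
    by_cases hq : n / 10 = 0
    · rw [if_pos hq]
      rw [Nat.digits_def' (by omega) (by omega), hq]
      simp
    · rw [if_neg hq]
      rw [show Nat.digits 10 n = n % 10 :: Nat.digits 10 (n / 10) from
        Nat.digits_def' (by omega) (by omega)]
      rw [ih (n / 10) _ hq (by omega)]
      simp

theorem pvToDigits_eq (n : Nat) (h : n ≠ 0) :
    Nat.toDigits 10 n = ((Nat.digits 10 n).map Nat.digitChar).reverse := by
  rw [Nat.toDigits, pvToDigitsCore_eq (n + 1) n [] h (by omega)]; simp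

-- map by a function injective on the list's members preserves/reflects equality of lists
theorem pvMap_eq_iff {α β : Type} (f : α → β) : ∀ (L M : List α),
    (∀ x ∈ L, ∀ y ∈ M, f x = f y → x = y) → (L.map f = M.map f ↔ L = M) := by
  intro L
  induction L with
  | nil => intro M _; cases M <;> simp
  | cons a L ih =>
    intro M hinj
    cases M with
    | nil => simp
    | cons b M =>
      simp only [List.map, List.cons.injEq]
      constructor
      · rintro ⟨h1, h2⟩
        have hab := hinj a (by simp) b (by simp) h1
        have := (ih M (fun x hx y hy => hinj x (by simp [hx]) y (by simp [hy]))).mp h2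
        exact ⟨hab, this⟩
      · rintro ⟨h1, h2⟩; subst h1; subst h2; exact ⟨rfl, rfl⟩

theorem pvDigitChar_inj (x y : Nat) (hx : x < 10) (hy : y < 10) :
    Nat.digitChar x = Nat.digitChar y → x = y := by
  interval_cases x <;> interval_cases y <;> simp_all [Nat.digitChar]

-- for a list of base-10 digits, char-level palindromy is digit-level palindromy
theorem pvPal_chars (L : List Nat) (hL : ∀ d ∈ L, d < 10) :
    (L.map Nat.digitChar = (L.map Nat.digitChar).reverse) ↔ (L = L.reverse) := by
  rw [← List.map_reverse]
  exact pvMap_eq_iff Nat.digitChar L L.reverse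
    (fun x hx y hy => pvDigitChar_inj x y (hL x hx) (hL y (List.mem_reverse.mp hy)))

theorem pvPal_ints (L : List Nat) :
    (L.map Int.ofNat = (L.map Int.ofNat).reverse) ↔ (L = L.reverse) := by
  rw [← List.map_reverse]
  exact pvMap_eq_iff Int.ofNat L L.reverse (fun x _ y _ h => Int.ofNat.inj h)

theorem pvAlt_eq (a b : Int) :
    check_prod_palindrome_alt a b =
      ((PySem.Int.toChars (a * b)) == (PySem.Int.toChars (a * b)).reverse) := by
  simp only [check_prod_palindrome_alt, PySem.Str.slice?_none_none_neg_one]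
  rw [Bool.eq_iff_iff, beq_iff_eq, beq_iff_eq]
  rw [← String.toList_inj, String.toList_ofList, PySem.Int.toList_toStr]

-- ===== VERDICT (by name: the statement is the Claim_ definition above) =====
theorem check_prod_palindrome_spec : Claim_equal_check_prod_palindrome := by
  intro a b _ hpre
  unfold Pre_check_prod_palindrome at hpre
  unfold Spec_check_prod_palindrome check_prod_palindrome
  rw [pvAlt_eq]
  simp only []
  by_cases h0 : a * b = 0
  · rw [h0]
    rw [show pvDigitsLoop_A 0 = [] by rw [pvDigitsLoop_A]; simp]
    rw [show PySem.Int.toChars 0 = ['0'] from rfl]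
    rfl
  · have hp : 0 < a * b := by omega
    have hn : (a * b).toNat ≠ 0 := by omega
    have hA := pvA_eq_digits (a * b) hpre
    have hchars : PySem.Int.toChars (a * b) =
        ((Nat.digits 10 (a * b).toNat).map Nat.digitChar).reverse := by
      unfold PySem.Int.toChars
      rw [if_neg (by omega)]
      exact pvToDigits_eq _ hn
    rw [hA, hchars]
    rw [Bool.eq_iff_iff, beq_iff_eq, beq_iff_eq]
    rw [pvPal_ints]
    rw [List.reverse_reverse]
    constructor
    · intro h
      have := (pvPal_chars (Nat.digits 10 (a * b).toNat)
        (fun d hd => Nat.digits_lt_base (by omega) hd)).mpr h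
      rw [← this]
    · intro h
      have h' : (Nat.digits 10 (a*b).toNat).map Nat.digitChar
          = ((Nat.digits 10 (a*b).toNat).map Nat.digitChar).reverse := h.symm
      exact ((pvPal_chars _ (fun d hd => Nat.digits_lt_base (by omega) hd)).mp h')
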